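-- pv_equiv track=rewrite | github.com/AKSShan10/LeetCode-Data-Structure-and-Algorithms | check.py | dfs_tree_from_adjacency_matrix
-- ===== SOURCE A (Python) =====
-- def dfs_tree_from_adjacency_matrix(adj_matrix):
--     n = len(adj_matrix)
--     visited = [False] * n
--     tree = {}
--
--     def dfs(node, parent=None):
--         visited[node] = True
--         if parent is not None:
--             if parent not in tree:
--                 tree[parent] = []
--             tree[parent].append(node)
--         for neighbor in range(n):
--             if adj_matrix[node][neighbor] == 1 and not visited[neighbor]:
--                 dfs(neighbor, node)
--
--     # Assuming we start the DFS from node 0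
--     dfs(0)
--     return tree
-- ===== SOURCE B (Python) =====
-- def dfs_tree_from_adjacency_matrix(adj_matrix):
--     n = len(adj_matrix)
--     visited = [False] * n
--     tree = {}
--     visited[0] = True
--     stack = [[0, 0]]
--     while stack:
--         node, idx = stack[-1]
--         child = None
--         while idx < n:
--             if adj_matrix[node][idx] == 1 and not visited[idx]:
--                 child = idx
--                 break
--             idx += 1
--         if child is None:
--             stack.pop()
--         else:
--             stack[-1][1] = child + 1
--             visited[child] = True
--             tree.setdefault(node, []).append(child)
--             stack.append([child, 0])
--     return tree
-- ===== Notes on version B (the rewrite author's own statement) =====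
-- stated objective: alternative
-- what changed: The recursive DFS with a mutating nested closure is replaced by an iterative DFS driven by an explicit stack of [node, next-neighbor-index] frames, with setdefault-based tree building; children are marked and recorded at the moment they are entered, so the same DFS tree is produced.
-- outside the precondition, e.g. on dfs_tree_from_adjacency_matrix([[0, 0], [0]]): A returns {}, B returns {}
import Mathlib
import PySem

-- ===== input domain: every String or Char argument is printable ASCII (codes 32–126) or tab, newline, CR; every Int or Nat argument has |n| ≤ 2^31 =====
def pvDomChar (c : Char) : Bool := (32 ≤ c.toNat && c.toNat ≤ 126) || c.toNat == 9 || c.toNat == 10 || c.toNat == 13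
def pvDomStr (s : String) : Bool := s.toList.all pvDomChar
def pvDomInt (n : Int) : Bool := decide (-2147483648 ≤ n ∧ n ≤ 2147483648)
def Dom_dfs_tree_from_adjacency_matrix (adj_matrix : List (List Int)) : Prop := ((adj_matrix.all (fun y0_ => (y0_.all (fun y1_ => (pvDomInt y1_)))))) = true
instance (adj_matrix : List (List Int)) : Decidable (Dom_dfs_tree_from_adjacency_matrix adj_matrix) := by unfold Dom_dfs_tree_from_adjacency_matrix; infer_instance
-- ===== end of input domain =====

-- B replaces A's recursive DFS (nested mutating closure) by an iterative DFS with an explicit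
-- stack of (node, next-neighbor-index) frames; same traversal, same tree, same cost.

-- Shared state type: (visited flags, DFS tree as insertion-ordered dict)
abbrev PVSt : Type := List Bool × PySem.Dict Int (List Int)

-- ===== PORT A =====
-- adj_matrix[node][neighbor]: both indices are in [0, n) and in range on Pre_, so getD is exact there
def pvAdjA (adj : List (List Int)) (node j : Nat) : Int := (adj.getD node []).getD j 0

mutual
-- dfs(node, parent): fuel counts remaining recursion depth; fuel = n suffices (each call marks a node)
def pvDfsA (adj : List (List Int)) (n : Nat) (fuel : Nat) (node : Nat) (parent : Option Nat) (st : PVSt) : PVSt :=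
  match fuel with
  | 0 => st
  | fa + 1 =>
    pvLoopA adj n fa node 0
      (st.1.set node true,
        match parent with
        | none => st.2
        | some p =>
          (if st.2.contains (p : Int) then st.2 else st.2.insert (p : Int) []).modify (p : Int) []
            (fun l => l ++ [(node : Int)]))
termination_by (fuel, 0)
-- 'for neighbor in range(n): if adj[node][neighbor] == 1 and not visited[neighbor]: dfs(neighbor, node)'
def pvLoopA (adj : List (List Int)) (n : Nat) (fa : Nat) (node : Nat) (i : Nat) (st : PVSt) : PVSt :=
  if i < n then
    if pvAdjA adj node i == 1 && !(st.1.getD i false) then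
      pvLoopA adj n fa node (i + 1) (pvDfsA adj n fa i (some node) st)
    else
      pvLoopA adj n fa node (i + 1) st
  else st
termination_by (fa, n - i + 1)
end

def dfs_tree_from_adjacency_matrix (adj_matrix : List (List Int)) : List (Int × List Int) :=
  (pvDfsA adj_matrix adj_matrix.length adj_matrix.length 0 none
    (List.replicate adj_matrix.length false, PySem.Dict.empty)).2.items

-- ===== PORT B =====
def pvAdjB (adj : List (List Int)) (node j : Nat) : Int := (adj.getD node []).getD j 0

-- inner scan: first idx ≥ i with adj[node][idx] == 1 and not visited[idx]
def pvFindB (adj : List (List Int)) (n : Nat) (visited : List Bool) (node : Nat) (i : Nat) : Option Nat :=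
  if i < n then
    if pvAdjB adj node i == 1 && !(visited.getD i false) then some i
    else pvFindB adj n visited node (i + 1)
  else none
termination_by n - i

-- 'while stack: …'; fuel counts pushes, n suffices (each push marks a node)
def pvMachB (adj : List (List Int)) (n : Nat) (fuel : Nat) (stack : List (Nat × Nat)) (st : PVSt) : PVSt :=
  match fuel, stack with
  | _, [] => st
  | 0, _ :: _ => st
  | fb + 1, (node, i) :: rest =>
    match pvFindB adj n st.1 node i with
    | some j =>
      pvMachB adj n fb ((j, 0) :: (node, j + 1) :: rest)
        (st.1.set j true, st.2.modify (node : Int) [] (fun l => l ++ [(j : Int)]))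
    | none => pvMachB adj n (fb + 1) rest st
termination_by (fuel, stack.length)

def dfs_tree_from_adjacency_matrix_alt (adj_matrix : List (List Int)) : List (Int × List Int) :=
  (pvMachB adj_matrix adj_matrix.length adj_matrix.length [(0, 0)]
    ((List.replicate adj_matrix.length false).set 0 true, PySem.Dict.empty)).2.items

-- ===== PRECONDITION & SPEC =====
-- Pre_ excludes the empty matrix (visited[0] raises IndexError in both programs) and matrices with a
-- row shorter than the matrix, on which the Python raises IndexError whenever DFS reaches that row
-- (when such a short row is unreachable both programs return the same partial tree).
def Pre_dfs_tree_from_adjacency_matrix (adj_matrix : List (List Int)) : Prop :=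
  adj_matrix ≠ [] ∧ ∀ row ∈ adj_matrix, adj_matrix.length ≤ row.length
instance (adj_matrix : List (List Int)) : Decidable (Pre_dfs_tree_from_adjacency_matrix adj_matrix) := by unfold Pre_dfs_tree_from_adjacency_matrix; infer_instance

def pvWitness_dfs_tree_from_adjacency_matrix : List (List Int) := [[0, 1], [1, 0]]

def Spec_dfs_tree_from_adjacency_matrix (adj_matrix : List (List Int)) (out : List (Int × List Int)) : Prop := out = dfs_tree_from_adjacency_matrix_alt adj_matrix
instance (adj_matrix : List (List Int)) (out : List (Int × List Int)) : Decidable (Spec_dfs_tree_from_adjacency_matrix adj_matrix out) := by unfold Spec_dfs_tree_from_adjacency_matrix; infer_instance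

-- ===== CLAIM (what is proved, stated in full; the proofs are below) =====
def Claim_equal_dfs_tree_from_adjacency_matrix : Prop := ∀ (adj_matrix : List (List Int)), Dom_dfs_tree_from_adjacency_matrix adj_matrix → Pre_dfs_tree_from_adjacency_matrix adj_matrix → Spec_dfs_tree_from_adjacency_matrix adj_matrix (dfs_tree_from_adjacency_matrix adj_matrix)

-- ===== LEMMAS AND PROOFS =====

-- one-step unfolding lemmas for the well-founded definitions
lemma pvDfsA_zero (adj : List (List Int)) (n node : Nat) (parent : Option Nat) (st : PVSt) :
    pvDfsA adj n 0 node parent st = st := by rw [pvDfsA.eq_def]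

lemma pvDfsA_succ (adj : List (List Int)) (n fa node : Nat) (parent : Option Nat) (st : PVSt) :
    pvDfsA adj n (fa + 1) node parent st =
      pvLoopA adj n fa node 0
        (st.1.set node true,
          match parent with
          | none => st.2
          | some p =>
            (if st.2.contains (p : Int) then st.2 else st.2.insert (p : Int) []).modify (p : Int) []
              (fun l => l ++ [(node : Int)])) := by rw [pvDfsA.eq_def]

lemma pvMachB_nil (adj : List (List Int)) (n fuel : Nat) (st : PVSt) :
    pvMachB adj n fuel [] st = st := by cases fuel <;> rw [pvMachB.eq_def]

lemma pvMachB_succ (adj : List (List Int)) (n fb node i : Nat) (rest : List (Nat × Nat)) (st : PVSt) :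
    pvMachB adj n (fb + 1) ((node, i) :: rest) st =
      (match pvFindB adj n st.1 node i with
        | some j =>
          pvMachB adj n fb ((j, 0) :: (node, j + 1) :: rest)
            (st.1.set j true, st.2.modify (node : Int) [] (fun l => l ++ [(j : Int)]))
        | none => pvMachB adj n (fb + 1) rest st) := by rw [pvMachB.eq_def]

lemma pv_count_set (v : List Bool) (j : Nat) (hj : j < v.length) (hf : v.getD j false = false) :
    (v.set j true).count false + 1 = v.count false := by
  induction v generalizing j with
  | nil => simp at hj
  | cons a t ih =>
    cases j with
    | zero =>
      simp [List.getD] at hf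
      simp [hf]
    | succ j =>
      simp [List.getD] at hf
      have hj' : j < t.length := by simpa using hj
      have := ih j hj' (by simpa [List.getD] using hf)
      simp [List.count_cons]
      omega

lemma pv_count_set_le (v : List Bool) (j : Nat) :
    (v.set j true).count false ≤ v.count false := by
  induction v generalizing j with
  | nil => simp
  | cons a t ih =>
    cases j with
    | zero => cases a <;> simp
    | succ j => simp [List.count_cons]; exact ih j

lemma pv_one_le_count (v : List Bool) (j : Nat) (hj : j < v.length) (hf : v.getD j false = false) :
    1 ≤ v.count false := by
  have := pv_count_set v j hj hf; omega

-- length and unvisited-count preservation through A's loop (given it holds for the dfs body)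
lemma pv_loopA_pres_aux (adj : List (List Int)) (n fa : Nat)
    (hd : ∀ node parent st, (pvDfsA adj n fa node parent st).1.length = st.1.length ∧
          (pvDfsA adj n fa node parent st).1.count false ≤ st.1.count false) :
    ∀ k i node st, n - i ≤ k →
      (pvLoopA adj n fa node i st).1.length = st.1.length ∧
      (pvLoopA adj n fa node i st).1.count false ≤ st.1.count false := by
  intro k
  induction k with
  | zero =>
    intro i node st h
    have hi : ¬ i < n := by omega
    rw [pvLoopA]; simp [hi]
  | succ k ih =>
    intro i node st h
    rw [pvLoopA]
    by_cases hi : i < n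
    · simp only [hi, if_true]
      by_cases hg : (pvAdjA adj node i == 1 && !(st.1.getD i false)) = true
      · simp only [hg, if_true]
        obtain ⟨hl1, hc1⟩ := hd i (some node) st
        obtain ⟨hl2, hc2⟩ := ih (i + 1) node (pvDfsA adj n fa i (some node) st) (by omega)
        exact ⟨hl2.trans hl1, hc2.trans hc1⟩
      · simp only [hg]
        exact ih (i + 1) node st (by omega)
    · simp [hi]

lemma pv_dfsA_pres (adj : List (List Int)) (n : Nat) :
    ∀ fa node parent st, (pvDfsA adj n fa node parent st).1.length = st.1.length ∧
      (pvDfsA adj n fa node parent st).1.count false ≤ st.1.count false := by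
  intro fa
  induction fa with
  | zero => intro node parent st; rw [pvDfsA_zero]; exact ⟨rfl, le_refl _⟩
  | succ fa ih =>
    intro node parent st
    rw [pvDfsA_succ]
    obtain ⟨hl, hc⟩ := pv_loopA_pres_aux adj n fa ih n 0 node
      (st.1.set node true,
        match parent with
        | none => st.2
        | some p =>
          (if st.2.contains (p : Int) then st.2 else st.2.insert (p : Int) []).modify (p : Int) []
            (fun l => l ++ [(node : Int)])) (by omega)
    refine ⟨by simpa using hl, ?_⟩
    exact le_trans hc (by simpa using pv_count_set_le st.1 node)

lemma pv_loopA_pres (adj : List (List Int)) (n fa i node : Nat) (st : PVSt) :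
    (pvLoopA adj n fa node i st).1.length = st.1.length ∧
    (pvLoopA adj n fa node i st).1.count false ≤ st.1.count false :=
  pv_loopA_pres_aux adj n fa (pv_dfsA_pres adj n fa) (n - i) i node st (le_refl _)

-- A's neighbor loop, characterized by B's scan-for-next-child
lemma pv_loopA_find_aux (adj : List (List Int)) (n fa : Nat) :
    ∀ k i node st, n - i ≤ k →
      pvLoopA adj n fa node i st =
        (match pvFindB adj n st.1 node i with
          | none => st
          | some j => pvLoopA adj n fa node (j + 1) (pvDfsA adj n fa j (some node) st)) := by
  intro k
  induction k with
  | zero =>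
    intro i node st h
    have hi : ¬ i < n := by omega
    rw [pvLoopA, pvFindB]; simp [hi]
  | succ k ih =>
    intro i node st h
    rw [pvLoopA, pvFindB]
    by_cases hi : i < n
    · simp only [hi, if_true]
      by_cases hg : (pvAdjB adj node i == 1 && !(st.1.getD i false)) = true
      · have hg' : (pvAdjA adj node i == 1 && !(st.1.getD i false)) = true := hg
        rw [if_pos hg', if_pos hg]
      · have hg' : ¬ (pvAdjA adj node i == 1 && !(st.1.getD i false)) = true := hg
        rw [if_neg hg', if_neg hg]
        exact ih (i + 1) node st (by omega)
    · simp [hi]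

lemma pv_loopA_find (adj : List (List Int)) (n fa i node : Nat) (st : PVSt) :
    pvLoopA adj n fa node i st =
      (match pvFindB adj n st.1 node i with
        | none => st
        | some j => pvLoopA adj n fa node (j + 1) (pvDfsA adj n fa j (some node) st)) :=
  pv_loopA_find_aux adj n fa (n - i) i node st (le_refl _)

lemma pv_find_some_aux (adj : List (List Int)) (n : Nat) (v : List Bool) (node : Nat) :
    ∀ k i j, n - i ≤ k → pvFindB adj n v node i = some j →
      j < n ∧ v.getD j false = false := by
  intro k
  induction k with
  | zero =>
    intro i j h hf
    have hi : ¬ i < n := by omega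
    rw [pvFindB] at hf; simp [hi] at hf
  | succ k ih =>
    intro i j h hf
    rw [pvFindB] at hf
    by_cases hi : i < n
    · simp only [hi, if_true] at hf
      by_cases hg : (pvAdjB adj node i == 1 && !(v.getD i false)) = true
      · simp only [hg, if_true, Option.some.injEq] at hf
        subst hf
        refine ⟨hi, ?_⟩
        simp only [Bool.and_eq_true, Bool.not_eq_true'] at hg
        exact hg.2
      · simp only [hg] at hf
        exact ih (i + 1) j (by omega) hf
    · simp [hi] at hf

lemma pv_find_some (adj : List (List Int)) (n : Nat) (v : List Bool) (node i j : Nat)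
    (hf : pvFindB adj n v node i = some j) : j < n ∧ v.getD j false = false :=
  pv_find_some_aux adj n v node (n - i) i j (le_refl _) hf

-- A's tree update equals B's setdefault-append update
lemma pv_ent_eq (d : PySem.Dict Int (List Int)) (p x : Int) :
    (if d.contains p then d else d.insert p []).modify p [] (fun l => l ++ [x]) =
      d.modify p [] (fun l => l ++ [x]) := by
  by_cases hc : d.contains p = true
  · simp [hc]
  · have hc' : d.contains p = false := by simpa using hc
    simp only [PySem.Dict.modify, hc', Bool.false_eq_true, if_false]
    rw [PySem.Dict.getD_insert_self, PySem.Dict.insert_insert_self,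
      PySem.Dict.getD_of_not_contains _ _ hc']

-- A's loop is fuel-independent once the fuel covers the number of unvisited nodes
lemma pv_amono (adj : List (List Int)) (n : Nat) :
    ∀ u (st : PVSt) (node i fa fa' : Nat), st.1.length = n → st.1.count false ≤ u →
      st.1.count false ≤ fa → st.1.count false ≤ fa' →
      pvLoopA adj n fa node i st = pvLoopA adj n fa' node i st := by
  intro u
  induction u using Nat.strong_induction_on with
  | _ u ih =>
    intro st node i fa fa' hlen hu hfa hfa'
    rw [pv_loopA_find adj n fa i node st, pv_loopA_find adj n fa' i node st]
    cases hfind : pvFindB adj n st.1 node i with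
    | none => rfl
    | some j =>
      obtain ⟨hjn, hjf⟩ := pv_find_some adj n st.1 node i j hfind
      have h1 : 1 ≤ st.1.count false := pv_one_le_count st.1 j (by omega) hjf
      obtain ⟨fb, rfl⟩ : ∃ x, fa = x + 1 := ⟨fa - 1, by omega⟩
      obtain ⟨fb', rfl⟩ : ∃ x, fa' = x + 1 := ⟨fa' - 1, by omega⟩
      dsimp only
      rw [pvDfsA_succ, pvDfsA_succ]
      dsimp only
      have hlen1 : (st.1.set j true).length = n := by simpa using hlen
      have hcnt1 : (st.1.set j true).count false + 1 = st.1.count false :=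
        pv_count_set st.1 j (by omega) hjf
      have key : ∀ t : PySem.Dict Int (List Int),
          pvLoopA adj n (fb + 1) node (j + 1) (pvLoopA adj n fb j 0 (st.1.set j true, t)) =
          pvLoopA adj n (fb' + 1) node (j + 1) (pvLoopA adj n fb' j 0 (st.1.set j true, t)) := by
        intro t
        have e1 : pvLoopA adj n fb j 0 (st.1.set j true, t) = pvLoopA adj n fb' j 0 (st.1.set j true, t) :=
          ih (u - 1) (by omega) (st.1.set j true, t) j 0 fb fb' hlen1
            (show (st.1.set j true).count false ≤ u - 1 by omega)
            (show (st.1.set j true).count false ≤ fb by omega)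
            (show (st.1.set j true).count false ≤ fb' by omega)
        rw [e1]
        obtain ⟨hl2, hc2⟩ := pv_loopA_pres adj n fb' 0 j (st.1.set j true, t)
        have hl2' : (pvLoopA adj n fb' j 0 (st.1.set j true, t)).1.length = (st.1.set j true).length := hl2
        have hc2' : (pvLoopA adj n fb' j 0 (st.1.set j true, t)).1.count false ≤ (st.1.set j true).count false := hc2
        exact ih (u - 1) (by omega) _ node (j + 1) (fb + 1) (fb' + 1)
          (hl2'.trans hlen1) (by omega) (by omega) (by omega)
      exact key _

-- B's machine is fuel-independent once the fuel exceeds the number of unvisited nodes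
lemma pv_mmono (adj : List (List Int)) (n : Nat) :
    ∀ u (st : PVSt), st.1.length = n → st.1.count false ≤ u →
      ∀ (stack : List (Nat × Nat)) (fb fb' : Nat), st.1.count false < fb → st.1.count false < fb' →
      pvMachB adj n fb stack st = pvMachB adj n fb' stack st := by
  intro u
  induction u using Nat.strong_induction_on with
  | _ u ih =>
    intro st hlen hu stack
    induction stack with
    | nil => intro fb fb' _ _; rw [pvMachB_nil, pvMachB_nil]
    | cons top rest ihs =>
      obtain ⟨node, i⟩ := top
      intro fb fb' hfb hfb'
      obtain ⟨f, rfl⟩ : ∃ x, fb = x + 1 := ⟨fb - 1, by omega⟩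
      obtain ⟨f', rfl⟩ : ∃ x, fb' = x + 1 := ⟨fb' - 1, by omega⟩
      rw [pvMachB_succ, pvMachB_succ]
      cases hfind : pvFindB adj n st.1 node i with
      | none => exact ihs (f + 1) (f' + 1) hfb hfb'
      | some j =>
        obtain ⟨hjn, hjf⟩ := pv_find_some adj n st.1 node i j hfind
        have hcnt1 : (st.1.set j true).count false + 1 = st.1.count false :=
          pv_count_set st.1 j (by omega) hjf
        exact ih (u - 1) (by omega)
          (st.1.set j true, st.2.modify (node : Int) [] (fun l => l ++ [(j : Int)]))
          (by simpa using hlen) (by dsimp only; omega) _ f f' (by dsimp only; omega) (by dsimp only; omega)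

-- the simulation: one stack frame of B computes A's neighbor loop for that node
lemma pv_sim (adj : List (List Int)) (n : Nat) :
    ∀ u (st : PVSt) (node i : Nat) (rest : List (Nat × Nat)) (fb : Nat),
      st.1.length = n → st.1.count false ≤ u → st.1.count false < fb →
      pvMachB adj n fb ((node, i) :: rest) st =
        pvMachB adj n fb rest (pvLoopA adj n (st.1.count false) node i st) := by
  intro u
  induction u using Nat.strong_induction_on with
  | _ u ih =>
    intro st node i rest fb hlen hu hfb
    obtain ⟨f, rfl⟩ : ∃ x, fb = x + 1 := ⟨fb - 1, by omega⟩
    rw [pvMachB_succ]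
    rw [pv_loopA_find adj n (st.1.count false) i node st]
    cases hfind : pvFindB adj n st.1 node i with
    | none => rfl
    | some j =>
      obtain ⟨hjn, hjf⟩ := pv_find_some adj n st.1 node i j hfind
      have h1 : 1 ≤ st.1.count false := pv_one_le_count st.1 j (by omega) hjf
      dsimp only
      have hlen1 : ((st.1.set j true : List Bool)).length = n := by simpa using hlen
      have hcnt1 : (st.1.set j true).count false + 1 = st.1.count false :=
        pv_count_set st.1 j (by omega) hjf
      -- B side: process the child frame, then the resumed parent frame
      rw [ih (u - 1) (by omega)
        (st.1.set j true, st.2.modify (node : Int) [] (fun l => l ++ [(j : Int)]))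
        j 0 ((node, j + 1) :: rest) f hlen1 (by dsimp only; omega) (by dsimp only; omega)]
      obtain ⟨c, hc⟩ : ∃ x, st.1.count false = x + 1 := ⟨st.1.count false - 1, by omega⟩
      have hcc : ((st.1.set j true, st.2.modify (node : Int) [] (fun l => l ++ [(j : Int)])) : PVSt).1.count false = c := by
        dsimp only; omega
      rw [hcc]
      set st1 : PVSt := (st.1.set j true, st.2.modify (node : Int) [] (fun l => l ++ [(j : Int)])) with hst1
      set st2 : PVSt := pvLoopA adj n c j 0 st1 with hst2
      obtain ⟨hl2, hc2⟩ := pv_loopA_pres adj n c 0 j st1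
      rw [← hst2] at hl2 hc2
      have hlen2 : st2.1.length = n := by rw [hl2]; exact hlen1
      have hcnt2 : st2.1.count false ≤ c := by
        have : st1.1.count false = c := hcc
        omega
      rw [ih (u - 1) (by omega) st2 node (j + 1) rest f hlen2 (by omega) (by omega)]
      -- A side: unfold the dfs call at the found child
      rw [hc, pvDfsA_succ]
      dsimp only
      rw [pv_ent_eq st.2 (node : Int) (j : Int)]
      rw [← hst1, ← hst2]
      -- align the fuels of the two remaining computations
      rw [pv_amono adj n (c + 1) st2 node (j + 1) (st2.1.count false) (c + 1)
        hlen2 (by omega) (le_refl _) (by omega)]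
      obtain ⟨hl3, hc3⟩ := pv_loopA_pres adj n (c + 1) (j + 1) node st2
      exact pv_mmono adj n u (pvLoopA adj n (c + 1) node (j + 1) st2)
        (by rw [hl3]; exact hlen2) (by omega) rest f (f + 1) (by omega) (by omega)

-- ===== VERDICT (by name: the statement is the Claim_ definition above) =====
theorem dfs_tree_from_adjacency_matrix_spec : Claim_equal_dfs_tree_from_adjacency_matrix := by
  intro adj hdom hpre
  unfold Spec_dfs_tree_from_adjacency_matrix
  unfold dfs_tree_from_adjacency_matrix dfs_tree_from_adjacency_matrix_alt
  obtain ⟨hne, _⟩ := hpre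
  obtain ⟨m, hm⟩ : ∃ m, adj.length = m + 1 := ⟨adj.length - 1, by cases adj <;> simp_all⟩
  rw [hm]
  rw [pvDfsA_succ]
  dsimp only
  have hget0 : (List.replicate (m + 1) false).getD 0 false = false := by
    simp [List.replicate_succ, List.getD]
  have hcnt0 : ((List.replicate (m + 1) false).set 0 true).count false = m := by
    have := pv_count_set (List.replicate (m + 1) false) 0 (by simp) hget0
    simp only [List.count_replicate] at this
    simp at this
    omega
  rw [pv_sim adj (m + 1) m ((List.replicate (m + 1) false).set 0 true, PySem.Dict.empty)
    0 0 [] (m + 1) (by simp)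
    (show ((List.replicate (m + 1) false).set 0 true).count false ≤ m by omega)
    (show ((List.replicate (m + 1) false).set 0 true).count false < m + 1 by omega)]
  rw [pvMachB_nil]
  rw [hcnt0]
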